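-- pv_equiv track=rewrite | github.com/Enin/codingTest | white_page.py | pm_level
-- ===== SOURCE A (Python) =====
-- level_1 = 30
--
-- level_2 = 80
--
-- level_3 = 150
--
-- def pm_level(pm):
--     level_temp = []
--
--     for i in range(len(pm)):
--         if pm[i] <= level_1:
--             level_temp.append(1)
--         elif pm[i] <= level_2:
--             level_temp.append(2)
--         elif pm[i] <= level_3:
--             level_temp.append(3)
--         else:
--             level_temp.append(4)
--
--     return level_temp
-- ===== SOURCE B (Python) =====
-- def pm_level(pm):
--     thresholds = (30, 80, 150)
--     return [1 + sum(1 for t in thresholds if t < x) for x in pm]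
-- ===== Notes on version B (the rewrite author's own statement) =====
-- stated objective: idiomatic
-- what changed: Replaces the if/elif ladder inside an index loop with a comprehension that computes each bucket as 1 + (count of thresholds strictly below the value), i.e. bisect_left over a threshold table.
import Mathlib
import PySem

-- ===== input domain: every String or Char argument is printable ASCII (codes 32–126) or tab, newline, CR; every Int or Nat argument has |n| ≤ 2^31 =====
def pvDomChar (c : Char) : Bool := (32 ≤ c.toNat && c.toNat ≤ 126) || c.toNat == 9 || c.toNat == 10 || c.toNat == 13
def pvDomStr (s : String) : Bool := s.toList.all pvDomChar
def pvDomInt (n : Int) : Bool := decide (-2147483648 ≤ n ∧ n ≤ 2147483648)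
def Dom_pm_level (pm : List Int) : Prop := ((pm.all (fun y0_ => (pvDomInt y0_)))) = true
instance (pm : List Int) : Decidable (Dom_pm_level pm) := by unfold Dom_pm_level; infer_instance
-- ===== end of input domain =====

-- B replaces A's index loop with an if/elif ladder by a comprehension computing
-- 1 + (count of thresholds strictly below the value); objective: idiomatic.

-- ===== PORT A =====
def pm_level (pm : List Int) : List Int :=
  (PySem.List.pyRange 0 (pm.length : Int) 1).foldl (fun level_temp i =>
    -- pm[i]; i is always in range, so pyGetD reads the element exactly as pm[i] does
    if PySem.List.pyGetD pm i 0 ≤ 30 then level_temp ++ [1]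
    else if PySem.List.pyGetD pm i 0 ≤ 80 then level_temp ++ [2]
    else if PySem.List.pyGetD pm i 0 ≤ 150 then level_temp ++ [3]
    else level_temp ++ [4]) []

-- ===== PORT B =====
def pm_level_alt (pm : List Int) : List Int :=
  pm.map (fun x => 1 + (((([30, 80, 150] : List Int).filter (fun t => t < x)).length : Int)))

-- ===== PRECONDITION & SPEC =====
def Spec_pm_level (pm : List Int) (out : List Int) : Prop := out = pm_level_alt pm
instance (pm : List Int) (out : List Int) : Decidable (Spec_pm_level pm out) := by unfold Spec_pm_level; infer_instance

-- ===== CLAIM (what is proved, stated in full; the proofs are below) =====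
def Claim_equal_pm_level : Prop := ∀ (pm : List Int), Dom_pm_level pm → Spec_pm_level pm (pm_level pm)

-- ===== LEMMAS AND PROOFS =====
theorem pm_level_foldl_eq_map (pm : List Int) :
    pm_level pm = pm.map (fun x =>
      if x ≤ 30 then (1 : Int) else if x ≤ 80 then 2 else if x ≤ 150 then 3 else 4) := by
  unfold pm_level
  have h := PySem.List.foldl_pyRange_pyGetD (xs := pm) (d := (0 : Int))
      (f := fun (acc : List Int) (x : Int) =>
        if x ≤ 30 then acc ++ [1]
        else if x ≤ 80 then acc ++ [2]
        else if x ≤ 150 then acc ++ [3]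
        else acc ++ [4]) (init := ([] : List Int)) (a := 0) (by omega)
  simp only [Int.toNat_zero, List.drop_zero, PySem.List.len] at h
  rw [h]
  have hbody : (fun (acc : List Int) (x : Int) =>
        if x ≤ 30 then acc ++ [1]
        else if x ≤ 80 then acc ++ [2]
        else if x ≤ 150 then acc ++ [3]
        else acc ++ [4]) = (fun (acc : List Int) (x : Int) => acc ++
          [if x ≤ 30 then (1 : Int) else if x ≤ 80 then 2 else if x ≤ 150 then 3 else 4]) := by
    funext acc x
    split_ifs <;> rfl
  rw [hbody, PySem.List.foldl_append_singleton_eq_map]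
  simp

theorem pm_level_spec : Claim_equal_pm_level := by
  intro pm _
  unfold Spec_pm_level pm_level_alt
  rw [pm_level_foldl_eq_map]
  apply List.map_congr_left
  intro x _
  by_cases h1 : (30 : Int) < x <;> by_cases h2 : (80 : Int) < x <;>
    by_cases h3 : (150 : Int) < x <;>
    simp [List.filter_cons, h1, h2, h3] <;> omega
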